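-- pv_equiv track=rewrite | github.com/iknoom/Problem_Solving | BOJ/7573.py | solution
-- ===== SOURCE A (Python) =====
-- def getInFishY(fish, x, w):
--     for fx, fy in fish:
--         if x <= fx <= x + w:
--             yield fy
--
-- def solution(N, I, fish):
--     answer = 0
--     for x in range(1, N):
--         for w in range(1, I // 2):
--             h = I // 2 - w
--             if x + w > N: continue
--             inFishY = sorted(getInFishY(fish, x, w))
--             l = 0
--             for r in range(len(inFishY)):
--                 while inFishY[r] - inFishY[l] > h:
--                     l += 1
--                 answer = max(answer, r - l + 1)
--     return answer
-- ===== SOURCE B (Python) =====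
-- def bisect_below(ys, v):
--     # first index in sorted ys whose element is >= v
--     lo, hi = 0, len(ys)
--     while lo < hi:
--         mid = (lo + hi) // 2
--         if ys[mid] < v:
--             lo = mid + 1
--         else:
--             hi = mid
--     return lo
--
-- def bisect_upto(ys, v):
--     # first index in sorted ys whose element is > v
--     lo, hi = 0, len(ys)
--     while lo < hi:
--         mid = (lo + hi) // 2
--         if ys[mid] <= v:
--             lo = mid + 1
--         else:
--             hi = mid
--     return lo
--
-- def solution(N, I, fish):
--     # Anchor-based counting: an optimal window can be slid until its top edge
--     # touches a fish, so trying every distinct in-range y as the top edge and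
--     # counting the fish inside [top - h, top] by binary search finds the maximum.
--     half = I // 2
--     best = 0
--     for x in range(1, N):
--         for w in range(1, half):
--             if x + w > N:
--                 continue
--             h = half - w
--             ys = sorted(fy for fx, fy in fish if x <= fx <= x + w)
--             for top in set(ys):
--                 cnt = bisect_upto(ys, top) - bisect_below(ys, top - h)
--                 if cnt > best:
--                     best = cnt
--     return best
-- ===== Notes on version B (the rewrite author's own statement) =====
-- stated objective: alternative
-- what changed: B drops A's two-pointer sliding window: per rectangle it tries every distinct in-range y as the top edge of the height-h window (a set of anchors) and counts the in-range fish inside [top-h, top] with two hand-written binary searches on the sorted y-list, instead of threading a left pointer across the rows.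
import Mathlib
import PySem

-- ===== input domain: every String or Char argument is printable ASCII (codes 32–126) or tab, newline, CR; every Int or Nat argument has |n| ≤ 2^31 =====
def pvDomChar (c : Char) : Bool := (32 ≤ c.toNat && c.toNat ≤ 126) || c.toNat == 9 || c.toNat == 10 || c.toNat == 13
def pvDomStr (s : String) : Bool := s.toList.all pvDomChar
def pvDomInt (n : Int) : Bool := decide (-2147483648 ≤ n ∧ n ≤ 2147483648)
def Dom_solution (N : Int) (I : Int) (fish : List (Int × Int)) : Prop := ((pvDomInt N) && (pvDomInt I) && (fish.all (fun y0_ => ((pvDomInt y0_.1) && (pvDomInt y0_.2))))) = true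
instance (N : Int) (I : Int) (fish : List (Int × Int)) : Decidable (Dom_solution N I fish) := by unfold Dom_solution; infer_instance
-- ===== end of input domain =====

-- B replaces A's two-pointer sliding window by anchor-based counting: every distinct
-- in-range y is tried as the window's top edge and the fish inside [top-h, top] are
-- counted by binary search — a different algorithm of similar cost, return value proved equal.

-- ===== PORT A =====
-- generator getInFishY: yields fy for each (fx, fy) with x <= fx <= x + w, in order
def getInFishY (fish : List (Int × Int)) (x : Int) (w : Int) : List Int :=
  (fish.filter (fun f => decide (x ≤ f.1 ∧ f.1 ≤ x + w))).map (fun f => f.2)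

-- the while loop 'while inFishY[r] - inFishY[l] > h: l += 1'.  In every state the Python
-- loop reaches, 0 ≤ l ≤ r < len(inFishY) and h ≥ 1, so the loop stops no later than l = r
-- (difference 0 is not > h); the 'l < r' guard (needed for termination) and the 0-default
-- of pyGetD are therefore exact on all reachable states.
def pvAdvA (ys : List Int) (h : Int) (r : Int) (l : Int) : Int :=
  if _hc : l < r then
    (if PySem.List.pyGetD ys r 0 - PySem.List.pyGetD ys l 0 > h then pvAdvA ys h r (l + 1) else l)
  else l
termination_by (r - l).toNat
decreasing_by omega

def solution (N : Int) (I : Int) (fish : List (Int × Int)) : Int :=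
  (PySem.List.pyRange 1 N 1).foldl (fun answer x =>
    (PySem.List.pyRange 1 (PySem.Int.floordiv I 2) 1).foldl (fun answer w =>
      let h := PySem.Int.floordiv I 2 - w
      if x + w > N then answer
      else
        let inFishY := PySem.List.sorted (getInFishY fish x w) (fun y => y) false
        ((PySem.List.pyRange 0 (PySem.List.len inFishY) 1).foldl
          (fun (st : Int × Int) r =>
            let l := pvAdvA inFishY h r st.1
            (l, max st.2 (r - l + 1))) (0, answer)).2) answer) 0

-- ===== PORT B =====
-- Source B's hand-written binary searches, transcribed loop for loop: the while's state is
-- (lo, hi); the structural fuel only bounds the iteration count (hi - lo halves each turn,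
-- so the initial fuel len(ys) passed below never runs out while lo < hi)
def pvBisLo (ys : List Int) (v : Int) : Nat → Int → Int → Int
  | 0, lo, _ => lo
  | fuel + 1, lo, hi =>
    if lo < hi then
      (if PySem.List.pyGetD ys (PySem.Int.floordiv (lo + hi) 2) 0 < v then
        pvBisLo ys v fuel (PySem.Int.floordiv (lo + hi) 2 + 1) hi
      else pvBisLo ys v fuel lo (PySem.Int.floordiv (lo + hi) 2))
    else lo

def pvBisUp (ys : List Int) (v : Int) : Nat → Int → Int → Int
  | 0, lo, _ => lo
  | fuel + 1, lo, hi =>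
    if lo < hi then
      (if PySem.List.pyGetD ys (PySem.Int.floordiv (lo + hi) 2) 0 ≤ v then
        pvBisUp ys v fuel (PySem.Int.floordiv (lo + hi) 2 + 1) hi
      else pvBisUp ys v fuel lo (PySem.Int.floordiv (lo + hi) 2))
    else lo

def solution_alt (N : Int) (I : Int) (fish : List (Int × Int)) : Int :=
  let half := PySem.Int.floordiv I 2
  (PySem.List.pyRange 1 N 1).foldl (fun best x =>
    (PySem.List.pyRange 1 half 1).foldl (fun best w =>
      if x + w > N then best
      else
        let h := half - w
        let ys := PySem.List.sorted
          ((fish.filter (fun f => decide (x ≤ f.1 ∧ f.1 ≤ x + w))).map (fun f => f.2))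
          (fun y => y) false
        (PySem.Set.ofList ys).foldl (fun best top =>
          let cnt := pvBisUp ys top ys.length 0 (PySem.List.len ys)
            - pvBisLo ys (top - h) ys.length 0 (PySem.List.len ys)
          if cnt > best then cnt else best) best) best) 0

-- ===== PRECONDITION & SPEC =====
def Spec_solution (N : Int) (I : Int) (fish : List (Int × Int)) (out : Int) : Prop := out = solution_alt N I fish
instance (N : Int) (I : Int) (fish : List (Int × Int)) (out : Int) : Decidable (Spec_solution N I fish out) := by unfold Spec_solution; infer_instance

-- ===== CLAIM (what is proved, stated in full; the proofs are below) =====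
def Claim_equal_solution : Prop := ∀ (N : Int) (I : Int) (fish : List (Int × Int)), Dom_solution N I fish → Spec_solution N I fish (solution N I fish)

-- ===== LEMMAS AND PROOFS =====

-- number of elements of ys strictly below thr
def pvCLt (ys : List Int) (thr : Int) : Nat := ys.countP (fun v => decide (v < thr))

-- A's sliding-window left bound for row r (the canonical value the threaded l reaches)
def pvC (ys : List Int) (h : Int) (r : Nat) : Nat := pvCLt ys (ys.getD r 0 - h)

-- the window size A records at row r
def pvVal (ys : List Int) (h : Int) (r : Nat) : Int := (r : Int) - (pvC ys h r : Int) + 1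

-- in a sorted list, a downward-closed predicate holds exactly on the prefix of length countP
theorem sorted_countP_iff (p : Int → Bool) (hp : ∀ a b : Int, a ≤ b → p b = true → p a = true) :
    ∀ (ys : List Int), ys.Pairwise (· ≤ ·) → ∀ i (hi : i < ys.length),
      (p ys[i] = true ↔ i < ys.countP p) := by
  intro ys hs
  induction ys with
  | nil => intro i hi; simp at hi
  | cons y t ih =>
    have hy : ∀ z ∈ t, y ≤ z := (List.pairwise_cons.mp hs).1
    have ht : t.Pairwise (· ≤ ·) := (List.pairwise_cons.mp hs).2
    intro i hi
    cases i with
    | zero =>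
      simp only [List.getElem_cons_zero, List.countP_cons]
      by_cases hpy : p y = true
      · simp [hpy]
      · constructor
        · intro hc; exact absurd hc hpy
        · intro hlt
          have h0 : t.countP p = 0 := by
            rw [List.countP_eq_zero]
            intro z hz hpz
            exact hpy (hp y z (hy z hz) hpz)
          simp [h0, hpy] at hlt
    | succ j =>
      simp only [List.getElem_cons_succ, List.countP_cons]
      have hj : j < t.length := by simpa using hi
      by_cases hpy : p y = true
      · simp only [hpy, if_pos]
        rw [ih ht j hj]
        omega
      · have h0 : t.countP p = 0 := by
          rw [List.countP_eq_zero]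
          intro z hz hpz
          exact hpy (hp y z (hy z hz) hpz)
        have : p t[j] = false := by
          by_contra hc
          have : p t[j] = true := by simpa using hc
          have := List.countP_pos_iff.mpr ⟨t[j], List.getElem_mem hj, this⟩
          omega
        simp [h0, hpy, this]

theorem pvC_le (ys : List Int) (h : Int) (hh : 0 ≤ h) (hs : ys.Pairwise (· ≤ ·))
    (r : Nat) (hr : r < ys.length) : pvC ys h r ≤ r := by
  by_contra hc
  rw [not_le] at hc
  have hiff := sorted_countP_iff (fun v => decide (v < ys.getD r 0 - h))
    (by intro a b hab hb; simp at hb ⊢; omega) ys hs r hr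
  have : ys[r] < ys.getD r 0 - h := by
    simpa using hiff.mpr (by simpa [pvC, pvCLt] using hc)
  rw [List.getD_eq_getElem ys 0 hr] at this
  omega

theorem pvC_mono (ys : List Int) (h : Int) (hs : ys.Pairwise (· ≤ ·))
    (r : Nat) (hr : r + 1 < ys.length) : pvC ys h r ≤ pvC ys h (r + 1) := by
  have hle : ys[r] ≤ ys[r+1] :=
    List.pairwise_iff_getElem.mp hs r (r+1) (by omega) hr (by omega)
  unfold pvC pvCLt
  rw [List.getD_eq_getElem ys 0 (by omega : r < ys.length), List.getD_eq_getElem ys 0 hr]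
  apply List.countP_mono_left
  intro z _ hz
  simp at hz ⊢
  omega

-- the while loop reaches exactly pvC, starting from any l ≤ pvC
theorem pvAdvA_eq (ys : List Int) (h : Int) (hh : 0 ≤ h) (hs : ys.Pairwise (· ≤ ·))
    (r : Nat) (hr : r < ys.length) :
    ∀ k l, l ≤ pvC ys h r → pvC ys h r - l = k → pvAdvA ys h (r : Int) (l : Int) = (pvC ys h r : Int) := by
  have hCr := pvC_le ys h hh hs r hr
  have hiff := sorted_countP_iff (fun v => decide (v < ys.getD r 0 - h))
    (by intro a b hab hb; simp at hb ⊢; omega) ys hs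
  intro k
  induction k with
  | zero =>
    intro l hl hk
    have hl' : l = pvC ys h r := by omega
    rw [hl']
    rw [pvAdvA]
    by_cases hc : ((pvC ys h r : Nat) : Int) < (r : Int)
    · rw [dif_pos hc]
      have hlr : pvC ys h r < ys.length := by omega
      have hnot : ¬ ys[pvC ys h r] < ys[r] - h := by
        intro hlt
        have := (hiff (pvC ys h r) hlr).mp
          (by rw [List.getD_eq_getElem ys 0 hr]; simpa using hlt)
        simp only [pvC, pvCLt] at this
        omega
      rw [PySem.List.pyGetD_natCast, PySem.List.pyGetD_natCast,
        List.getD_eq_getElem ys 0 hr, List.getD_eq_getElem ys 0 hlr, if_neg (by omega)]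
    · rw [dif_neg hc]
  | succ k ih =>
    intro l hl hk
    have hlC : l < pvC ys h r := by omega
    have hlr' : l < r := by omega
    have hlr : l < ys.length := by omega
    rw [pvAdvA, dif_pos (by exact_mod_cast hlr'), if_pos]
    · have : ((l : Int) + 1) = ((l + 1 : Nat) : Int) := by push_cast; ring
      rw [this]
      exact ih (l + 1) (by omega) (by omega)
    · have hl2 : ys[l] < ys[r] - h := by
        have := (hiff l hlr).mpr (by simpa [pvC, pvCLt] using hlC)
        rw [List.getD_eq_getElem ys 0 hr] at this
        simpa using this
      rw [PySem.List.pyGetD_natCast, PySem.List.pyGetD_natCast,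
        List.getD_eq_getElem ys 0 hr, List.getD_eq_getElem ys 0 hlr]
      omega

-- the left bound the threaded state holds after processing rows 0..m-1
def pvL (ys : List Int) (h : Int) (m : Nat) : Int :=
  if m = 0 then 0 else (pvC ys h (m - 1) : Int)

-- A's inner fold, characterised: state = (pvL, running max of the recorded window sizes)
theorem foldA_eq (ys : List Int) (h : Int) (hh : 0 ≤ h) (hs : ys.Pairwise (· ≤ ·)) (a : Int) :
    ∀ m, m ≤ ys.length →
      (List.range m).foldl
        (fun (st : Int × Int) (k : Nat) =>
          let l := pvAdvA ys h (k : Int) st.1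
          (l, max st.2 ((k : Int) - l + 1))) (0, a)
      = (pvL ys h m, List.foldl max a ((List.range m).map (pvVal ys h))) := by
  intro m
  induction m with
  | zero => intro _; simp [pvL]
  | succ m ih =>
    intro hm
    rw [List.range_succ, List.foldl_append, ih (by omega),
      List.map_append, List.foldl_append]
    have hL : ∃ l : Nat, pvL ys h m = (l : Int) ∧ l ≤ pvC ys h m := by
      by_cases h0 : m = 0
      · exact ⟨0, by simp [pvL, h0], by omega⟩
      · refine ⟨pvC ys h (m - 1), by simp [pvL, h0], ?_⟩
        have := pvC_mono ys h hs (m - 1) (by omega)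
        simpa [Nat.sub_add_cancel (by omega : 1 ≤ m)] using this
    obtain ⟨l, hl, hlle⟩ := hL
    simp only [List.map_cons, List.map_nil, List.foldl_cons, List.foldl_nil]
    show (let l' := pvAdvA ys h (m : Int) (pvL ys h m);
      (l', max (List.foldl max a ((List.range m).map (pvVal ys h))) ((m : Int) - l' + 1))) = _
    rw [hl, pvAdvA_eq ys h hh hs m hm (pvC ys h m - l) l hlle rfl]
    simp [pvL, pvVal]

-- upper bound for a fold of max
theorem foldl_max_le (l : List Int) : ∀ (a : Int) {b : Int}, a ≤ b → (∀ v ∈ l, v ≤ b) →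
    List.foldl max a l ≤ b := by
  induction l with
  | nil => intro a b ha _; simpa using ha
  | cons x t ih =>
    intro a b ha hl
    simp only [List.foldl_cons]
    exact ih (max a x) (max_le ha (hl x List.mem_cons_self))
      (fun v hv => hl v (List.mem_cons_of_mem x hv))

-- count of the window anchored at 'top'
def pvCnt (box : List Int) (h : Int) (top : Int) : Nat :=
  box.countP (fun fy => decide (top - h ≤ fy ∧ fy ≤ top))

theorem countP_split (l : List Int) (top thr : Int) (hth : thr ≤ top) :
    l.countP (fun v => decide (v ≤ top))
      = l.countP (fun v => decide (thr ≤ v ∧ v ≤ top)) + l.countP (fun v => decide (v < thr)) := by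
  induction l with
  | nil => simp
  | cons x t ih =>
    rw [List.countP_cons, List.countP_cons, List.countP_cons, ih]
    simp only [decide_eq_true_eq]
    split_ifs <;> omega

-- every window A records is at most the anchored count at its top fish
theorem val_le_cnt (ys : List Int) (h : Int) (hh : 0 ≤ h) (hs : ys.Pairwise (· ≤ ·))
    (r : Nat) (hr : r < ys.length) :
    pvVal ys h r ≤ (pvCnt ys h ys[r] : Int) := by
  have hCr := pvC_le ys h hh hs r hr
  set c := pvC ys h r with hc
  -- the segment of indices [c, r] all lie in the window [ys[r]-h, ys[r]]
  have hseg : ∀ i, c ≤ i → i ≤ r → ∀ (hi : i < ys.length),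
      ys[r] - h ≤ ys[i] ∧ ys[i] ≤ ys[r] := by
    intro i hci hir hi
    constructor
    · have hiff := sorted_countP_iff (fun v => decide (v < ys.getD r 0 - h))
        (by intro a b hab hb; simp at hb ⊢; omega) ys hs i hi
      have : ¬ ys[i] < ys.getD r 0 - h := by
        intro hlt
        have := hiff.mp (by simpa using hlt)
        rw [hc] at hci
        simp only [pvC, pvCLt] at hci
        omega
      rw [List.getD_eq_getElem ys 0 hr] at this
      omega
    · rcases Nat.lt_or_ge i r with hir' | hir'
      · exact List.pairwise_iff_getElem.mp hs i r hi hr hir'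
      · have hieq : i = r := by omega
        subst hieq; exact le_refl _
  -- the segment is a sublist of ys of length r + 1 - c, all satisfying the window predicate
  have hsub : ((ys.take (r + 1)).drop c).Sublist ys :=
    (List.drop_sublist c _).trans (List.take_sublist _ _)
  have hlen : ((ys.take (r + 1)).drop c).length = r + 1 - c := by
    simp [List.length_drop, List.length_take]
    omega
  have hall : ∀ v ∈ (ys.take (r + 1)).drop c,
      (fun fy => decide (ys[r] - h ≤ fy ∧ fy ≤ ys[r])) v = true := by
    intro v hv
    obtain ⟨j, hj, hjv⟩ := List.mem_iff_getElem.mp hv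
    have hjlen : c + j < ys.length := by
      have := hj
      simp [List.length_drop, List.length_take] at this
      omega
    have : v = ys[c + j] := by
      rw [← hjv, List.getElem_drop, List.getElem_take]
    subst this
    have hcj : c + j ≤ r := by
      have := hj
      simp [List.length_drop, List.length_take] at this
      omega
    have := hseg (c + j) (by omega) hcj hjlen
    simpa using this
  have hcount : r + 1 - c ≤ pvCnt ys h ys[r] := by
    calc r + 1 - c = ((ys.take (r + 1)).drop c).length := hlen.symm
    _ = ((ys.take (r + 1)).drop c).countP _ := (List.countP_eq_length.mpr hall).symm
    _ ≤ pvCnt ys h ys[r] := hsub.countP_le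
  unfold pvVal
  have : ((r + 1 - c : Nat) : Int) = (r : Int) - (c : Int) + 1 := by omega
  omega

-- every anchored count is attained by A at the last row holding that value
theorem cnt_attained (ys : List Int) (h : Int) (hh : 0 ≤ h) (hs : ys.Pairwise (· ≤ ·))
    (top : Int) (htop : top ∈ ys) :
    ∃ r : Nat, r < ys.length ∧ (pvCnt ys h top : Int) = pvVal ys h r := by
  set m := ys.countP (fun v => decide (v ≤ top)) with hm
  have hle_iff := sorted_countP_iff (fun v => decide (v ≤ top))
    (by intro a b hab hb; simp at hb ⊢; omega) ys hs
  obtain ⟨i, hi, hiv⟩ := List.mem_iff_getElem.mp htop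
  have hmpos : 0 < m := by
    have := (hle_iff i hi).mp (by simp [hiv])
    omega
  have hmn : m ≤ ys.length := List.countP_le_length
  refine ⟨m - 1, by omega, ?_⟩
  have hrlen : m - 1 < ys.length := by omega
  -- ys[m-1] = top
  have h1 : ys[m - 1] ≤ top := by
    have := (hle_iff (m - 1) hrlen).mpr (by omega)
    simpa using this
  have h2 : top ≤ ys[m - 1] := by
    have him : i ≤ m - 1 := by
      have := (hle_iff i hi).mp (by simp [hiv])
      omega
    rcases Nat.lt_or_ge i (m - 1) with hlt | hge
    · have := List.pairwise_iff_getElem.mp hs i (m - 1) hi hrlen hlt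
      omega
    · have hieq : i = m - 1 := by omega
      subst hieq
      exact le_of_eq hiv.symm
  have htopeq : ys[m - 1] = top := le_antisymm h1 h2
  have hC : pvC ys h (m - 1) = ys.countP (fun v => decide (v < top - h)) := by
    unfold pvC pvCLt
    rw [List.getD_eq_getElem ys 0 hrlen, htopeq]
  have hsplit := countP_split ys top (top - h) (by omega)
  have hCle : pvC ys h (m - 1) ≤ m - 1 := pvC_le ys h hh hs (m - 1) hrlen
  have hcnt : pvCnt ys h top + pvC ys h (m - 1) = m := by
    unfold pvCnt
    rw [hC]
    omega
  unfold pvVal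
  omega

-- Source B's binary searches land exactly on the boundary counts of a sorted list
theorem pvBisLo_eq (ys : List Int) (hs : ys.Pairwise (· ≤ ·)) (v : Int) :
    ∀ (d lo hi : Nat), hi - lo ≤ d →
      lo ≤ ys.countP (fun z => decide (z < v)) →
      ys.countP (fun z => decide (z < v)) ≤ hi → hi ≤ ys.length →
      pvBisLo ys v d (lo : Int) (hi : Int) = (ys.countP (fun z => decide (z < v)) : Int) := by
  have hiff := sorted_countP_iff (fun z => decide (z < v))
    (by intro a b hab hb; simp at hb ⊢; omega) ys hs
  intro d
  induction d with
  | zero =>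
    intro lo hi hd hlo hhi hlen
    simp only [pvBisLo]
    omega
  | succ d ih =>
    intro lo hi hd hlo hhi hlen
    by_cases hlh : lo < hi
    · rw [pvBisLo, if_pos (by exact_mod_cast hlh : (lo : Int) < (hi : Int))]
      have hcast : ((lo : Int) + (hi : Int)) = (((lo + hi : Nat)) : Int) := by push_cast; ring
      have hmid : PySem.Int.floordiv ((lo : Int) + (hi : Int)) 2 = (((lo + hi) / 2 : Nat) : Int) := by
        rw [hcast]; exact_mod_cast PySem.Int.floordiv_natCast (lo + hi) 2
      have hmlt : (lo + hi) / 2 < hi := by omega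
      have hmge : lo ≤ (lo + hi) / 2 := by omega
      have hmlen : (lo + hi) / 2 < ys.length := by omega
      rw [hmid, PySem.List.pyGetD_natCast, List.getD_eq_getElem ys 0 hmlen]
      by_cases hc : ys[(lo + hi) / 2] < v
      · rw [if_pos hc]
        have := (hiff _ hmlen).mp (by simpa using hc)
        have hcast2 : (((lo + hi) / 2 : Nat) : Int) + 1 = (((lo + hi) / 2 + 1 : Nat) : Int) := by
          push_cast; ring
        rw [hcast2]
        exact ih ((lo + hi) / 2 + 1) hi (by omega) (by omega) hhi hlen
      · rw [if_neg hc]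
        have hnlt : ¬ (lo + hi) / 2 < ys.countP (fun z => decide (z < v)) := by
          intro hlt
          exact hc (by simpa using (hiff _ hmlen).mpr hlt)
        exact ih lo ((lo + hi) / 2) (by omega) hlo (by omega) (by omega)
    · rw [pvBisLo, if_neg (by omega : ¬ (lo : Int) < (hi : Int))]
      omega

theorem pvBisUp_eq (ys : List Int) (hs : ys.Pairwise (· ≤ ·)) (v : Int) :
    ∀ (d lo hi : Nat), hi - lo ≤ d →
      lo ≤ ys.countP (fun z => decide (z ≤ v)) →
      ys.countP (fun z => decide (z ≤ v)) ≤ hi → hi ≤ ys.length →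
      pvBisUp ys v d (lo : Int) (hi : Int) = (ys.countP (fun z => decide (z ≤ v)) : Int) := by
  have hiff := sorted_countP_iff (fun z => decide (z ≤ v))
    (by intro a b hab hb; simp at hb ⊢; omega) ys hs
  intro d
  induction d with
  | zero =>
    intro lo hi hd hlo hhi hlen
    simp only [pvBisUp]
    omega
  | succ d ih =>
    intro lo hi hd hlo hhi hlen
    by_cases hlh : lo < hi
    · rw [pvBisUp, if_pos (by exact_mod_cast hlh : (lo : Int) < (hi : Int))]
      have hcast : ((lo : Int) + (hi : Int)) = (((lo + hi : Nat)) : Int) := by push_cast; ring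
      have hmid : PySem.Int.floordiv ((lo : Int) + (hi : Int)) 2 = (((lo + hi) / 2 : Nat) : Int) := by
        rw [hcast]; exact_mod_cast PySem.Int.floordiv_natCast (lo + hi) 2
      have hmlt : (lo + hi) / 2 < hi := by omega
      have hmge : lo ≤ (lo + hi) / 2 := by omega
      have hmlen : (lo + hi) / 2 < ys.length := by omega
      rw [hmid, PySem.List.pyGetD_natCast, List.getD_eq_getElem ys 0 hmlen]
      by_cases hc : ys[(lo + hi) / 2] ≤ v
      · rw [if_pos hc]
        have := (hiff _ hmlen).mp (by simpa using hc)
        have hcast2 : (((lo + hi) / 2 : Nat) : Int) + 1 = (((lo + hi) / 2 + 1 : Nat) : Int) := by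
          push_cast; ring
        rw [hcast2]
        exact ih ((lo + hi) / 2 + 1) hi (by omega) (by omega) hhi hlen
      · rw [if_neg hc]
        have hnlt : ¬ (lo + hi) / 2 < ys.countP (fun z => decide (z ≤ v)) := by
          intro hlt
          exact hc (by simpa using (hiff _ hmlen).mpr hlt)
        exact ih lo ((lo + hi) / 2) (by omega) hlo (by omega) (by omega)
    · rw [pvBisUp, if_neg (by omega : ¬ (lo : Int) < (hi : Int))]
      omega

-- the inner rectangle computation: A's sorted two-pointer pass = B's anchor counting pass
theorem inner_eq (box : List Int) (h : Int) (hh : 1 ≤ h) (a : Int) :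
    (((PySem.List.pyRange 0 (PySem.List.len (PySem.List.sorted box (fun y => y) false)) 1).foldl
        (fun (st : Int × Int) r =>
          let l := pvAdvA (PySem.List.sorted box (fun y => y) false) h r st.1
          (l, max st.2 (r - l + 1))) (0, a)).2)
    = (PySem.Set.ofList (PySem.List.sorted box (fun y => y) false)).foldl (fun best top =>
        let cnt := pvBisUp (PySem.List.sorted box (fun y => y) false) top
            (PySem.List.sorted box (fun y => y) false).length 0
            (PySem.List.len (PySem.List.sorted box (fun y => y) false))
          - pvBisLo (PySem.List.sorted box (fun y => y) false) (top - h)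
            (PySem.List.sorted box (fun y => y) false).length 0
            (PySem.List.len (PySem.List.sorted box (fun y => y) false))
        if cnt > best then cnt else best) a := by
  set ys := PySem.List.sorted box (fun y => y) false with hys
  have hs : ys.Pairwise (· ≤ ·) := by
    have := PySem.List.sorted_pairwise box (fun y : Int => y)
    simpa [hys] using this
  -- B side: each step is a max with the anchored count, computed by the two binary searches
  have hB : (PySem.Set.ofList ys).foldl (fun best top =>
        let cnt := pvBisUp ys top ys.length 0 (PySem.List.len ys)
          - pvBisLo ys (top - h) ys.length 0 (PySem.List.len ys)
        if cnt > best then cnt else best) a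
      = List.foldl max a ((PySem.Set.ofList ys).map (fun top => (pvCnt ys h top : Int))) := by
    rw [List.foldl_map]
    apply PySem.List.foldl_congr_mem
    intro acc top _
    have hm : ys.countP (fun z => decide (z ≤ top)) ≤ ys.length := List.countP_le_length
    have hc : ys.countP (fun z => decide (z < top - h)) ≤ ys.length := List.countP_le_length
    have hup := pvBisUp_eq ys hs top ys.length 0 ys.length (by omega) (by omega) hm (le_refl _)
    have hlo := pvBisLo_eq ys hs (top - h) ys.length 0 ys.length (by omega) (by omega) hc (le_refl _)
    have hsplit := countP_split ys top (top - h) (by omega)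
    rw [PySem.List.len_eq]
    simp only [Nat.cast_zero] at hup hlo
    rw [hup, hlo]
    have hcnt : (ys.countP (fun z => decide (z ≤ top)) : Int)
        - (ys.countP (fun z => decide (z < top - h)) : Int) = ((pvCnt ys h top : Nat) : Int) := by
      unfold pvCnt
      omega
    rw [hcnt]
    show (if ((pvCnt ys h top : Int)) > acc then ((pvCnt ys h top : Int)) else acc)
        = max acc ((pvCnt ys h top : Int))
    split_ifs with hgt
    · exact (max_eq_right (le_of_lt hgt)).symm
    · exact (max_eq_left (not_lt.mp hgt)).symm
  -- A side: the indexed fold records pvVal at every row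
  have hA : ((PySem.List.pyRange 0 (PySem.List.len ys) 1).foldl
        (fun (st : Int × Int) r =>
          let l := pvAdvA ys h r st.1
          (l, max st.2 (r - l + 1))) (0, a)).2
      = List.foldl max a ((List.range ys.length).map (pvVal ys h)) := by
    have hrange : PySem.List.pyRange 0 (PySem.List.len ys) 1
        = List.map (fun k : Nat => (k : Int)) (List.range ys.length) := by
      rw [PySem.List.len_eq]
      exact PySem.List.pyRange_zero_nat ys.length
    rw [hrange, List.foldl_map]
    exact congrArg Prod.snd (foldA_eq ys h (by omega) hs a ys.length (le_refl _))
  rw [hA, hB]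
  apply le_antisymm
  · apply foldl_max_le
    · exact (PySem.List.le_foldl_max _ a).1
    · intro v hv
      obtain ⟨r, hr, hrv⟩ := List.mem_map.mp hv
      have hrlen : r < ys.length := List.mem_range.mp hr
      rw [← hrv]
      calc pvVal ys h r ≤ (pvCnt ys h ys[r] : Int) := val_le_cnt ys h (by omega) hs r hrlen
      _ ≤ _ := by
        exact (PySem.List.le_foldl_max _ a).2 _
          (List.mem_map.mpr ⟨ys[r], (PySem.Set.mem_ofList ys ys[r]).mpr (List.getElem_mem hrlen), rfl⟩)
  · apply foldl_max_le
    · exact (PySem.List.le_foldl_max _ a).1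
    · intro v hv
      obtain ⟨top, htop, htopv⟩ := List.mem_map.mp hv
      obtain ⟨r, hr, hrv⟩ := cnt_attained ys h (by omega) hs top ((PySem.Set.mem_ofList ys top).mp htop)
      rw [← htopv, hrv]
      exact (PySem.List.le_foldl_max _ a).2 _
        (List.mem_map.mpr ⟨r, by simpa using hr, rfl⟩)

-- ===== VERDICT (by name: the statement is the Claim_ definition above) =====
theorem solution_spec : Claim_equal_solution := by
  intro N I fish _
  unfold Spec_solution solution solution_alt
  refine congrArg (fun f => List.foldl f 0 (PySem.List.pyRange 1 N 1)) ?_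
  funext ans x
  apply PySem.List.foldl_congr_mem
  intro acc w hw
  have hwlt : w < PySem.Int.floordiv I 2 := (PySem.List.mem_pyRange_one.mp hw).2
  by_cases hxw : x + w > N
  · simp only [hxw, if_pos]
  · simp only [hxw, if_false]
    have hh : 1 ≤ PySem.Int.floordiv I 2 - w := by omega
    exact inner_eq (getInFishY fish x w) (PySem.Int.floordiv I 2 - w) hh acc
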